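-- pv_equiv track=rewrite | github.com/kuparchad-gif/nexus-core | app/anynode/app/src/reflex_core.py | identify_root_cause
-- ===== SOURCE A (Python) =====
-- def identify_root_cause(symptoms, system_map):
--     suspects = {}
--     for symptom in symptoms:
--         for component, faults in system_map.items():
--             if symptom in faults:
--                 suspects[component] = suspects.get(component, 0) + 1
--     ranked = sorted(suspects.items(), key=lambda x: x[1], reverse=True)
--     return ranked[0][0] if ranked else None
-- ===== SOURCE B (Python) =====
-- def identify_root_cause(symptoms, system_map):
--     # Invert the map once: fault -> components listing it (in system_map order,
--     # each component at most once per fault), then count matches per symptom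
--     # and take the first component with the highest count in a single scan.
--     index = {}
--     for component, faults in system_map.items():
--         for fault in dict.fromkeys(faults):
--             index.setdefault(fault, []).append(component)
--     counts = {}
--     for symptom in symptoms:
--         for component in index.get(symptom, []):
--             counts[component] = counts.get(component, 0) + 1
--     best = None
--     best_score = None
--     for component, score in counts.items():
--         if best_score is None or score > best_score:
--             best, best_score = component, score
--     return best
-- ===== Notes on version B (the rewrite author's own statement) =====
-- stated objective: faster
-- what changed: Replaced the per-symptom scan over all components' fault lists by a fault->components inverted index built once, and replaced the full descending sort by a single first-max scan over the counts.
import Mathlib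
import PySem

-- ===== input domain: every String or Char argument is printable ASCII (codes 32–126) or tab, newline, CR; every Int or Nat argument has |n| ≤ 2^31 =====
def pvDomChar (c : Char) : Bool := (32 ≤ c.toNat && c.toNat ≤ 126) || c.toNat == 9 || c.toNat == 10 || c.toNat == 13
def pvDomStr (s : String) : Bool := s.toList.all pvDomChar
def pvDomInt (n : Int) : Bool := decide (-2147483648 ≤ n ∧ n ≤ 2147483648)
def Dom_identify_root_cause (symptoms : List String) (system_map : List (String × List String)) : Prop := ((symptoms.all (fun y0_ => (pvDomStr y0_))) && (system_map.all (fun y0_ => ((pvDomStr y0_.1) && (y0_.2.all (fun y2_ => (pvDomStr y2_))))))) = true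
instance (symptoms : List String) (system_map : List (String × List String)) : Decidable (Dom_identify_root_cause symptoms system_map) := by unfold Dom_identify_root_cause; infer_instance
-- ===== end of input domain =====

-- B builds a fault→components inverted index once and takes the best count by a
-- single first-max scan instead of A's per-symptom scan over every component plus a sort.

-- ===== PORT A =====
def identify_root_cause (symptoms : List String) (system_map : List (String × List String)) : Option String :=
  let smap : PySem.Dict String (List String) := PySem.Dict.ofList system_map
  let suspects : PySem.Dict String Int :=
    symptoms.foldl (fun d symptom =>
      smap.items.foldl (fun d p =>
        if symptom ∈ p.2 then d.insert p.1 (d.getD p.1 0 + 1) else d) d)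
      PySem.Dict.empty
  let ranked := PySem.List.sorted suspects.items (fun x => x.2) true
  match ranked with
  | [] => none
  | x :: _ => some x.1

-- ===== PORT B =====
def identify_root_cause_alt (symptoms : List String) (system_map : List (String × List String)) : Option String :=
  let smap : PySem.Dict String (List String) := PySem.Dict.ofList system_map
  let index : PySem.Dict String (List String) :=
    smap.items.foldl (fun d p =>
      (PySem.List.dedup p.2).foldl (fun d fault => d.insert fault (d.getD fault [] ++ [p.1])) d)
      PySem.Dict.empty
  let counts : PySem.Dict String Int :=
    symptoms.foldl (fun d symptom =>
      (index.getD symptom []).foldl (fun d c => d.insert c (d.getD c 0 + 1)) d)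
      PySem.Dict.empty
  let r : Option String × Option Int :=
    counts.items.foldl (fun b p =>
      if (match b.2 with | none => true | some s => decide (s < p.2)) then (some p.1, some p.2) else b)
      (none, none)
  r.1

-- ===== PRECONDITION & SPEC =====
def Spec_identify_root_cause (symptoms : List String) (system_map : List (String × List String)) (out : Option String) : Prop := out = identify_root_cause_alt symptoms system_map
instance (symptoms : List String) (system_map : List (String × List String)) (out : Option String) : Decidable (Spec_identify_root_cause symptoms system_map out) := by unfold Spec_identify_root_cause; infer_instance

-- ===== CLAIM (what is proved, stated in full; the proofs are below) =====
def Claim_equal_identify_root_cause : Prop := ∀ (symptoms : List String) (system_map : List (String × List String)), Dom_identify_root_cause symptoms system_map → Spec_identify_root_cause symptoms system_map (identify_root_cause symptoms system_map)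

-- ===== LEMMAS AND PROOFS =====

-- Inner index-building loop: folding a nodup fault list appends c to key s exactly when s is in it.
theorem getD_inner_fold (fs : List String) (hnd : fs.Nodup) (d : PySem.Dict String (List String))
    (c s : String) :
    ((fs.foldl (fun d fault => d.insert fault (d.getD fault [] ++ [c])) d).getD s [])
      = d.getD s [] ++ (if s ∈ fs then [c] else []) := by
  induction fs generalizing d with
  | nil => simp
  | cons f fs ih =>
    simp only [List.foldl_cons]
    rw [ih (List.Nodup.of_cons hnd)]
    rw [PySem.Dict.getD_insert]
    by_cases hsf : s = f
    · subst hsf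
      have : s ∉ fs := (List.nodup_cons.mp hnd).1
      simp [this]
    · simp [hsf, List.mem_cons]

-- Outer index-building loop: key s holds the components whose fault list contains s, in order.
theorem getD_index_fold (L : List (String × List String)) (d : PySem.Dict String (List String))
    (s : String) :
    ((L.foldl (fun d p =>
        (PySem.List.dedup p.2).foldl (fun d fault => d.insert fault (d.getD fault [] ++ [p.1])) d) d).getD s [])
      = d.getD s [] ++ (L.filter (fun p => decide (s ∈ p.2))).map (fun p => p.1) := by
  induction L generalizing d with
  | nil => simp
  | cons p L ih =>
    simp only [List.foldl_cons]
    rw [ih]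
    rw [getD_inner_fold _ (PySem.List.nodup_dedup p.2)]
    by_cases h : s ∈ p.2
    · simp [h, PySem.List.mem_dedup]
    · simp [h, PySem.List.mem_dedup]

-- The per-symptom counting step of A and of B update the dict identically.
theorem counts_step_eq (smapItems : List (String × List String)) (s : String)
    (d : PySem.Dict String Int) :
    smapItems.foldl (fun d p => if s ∈ p.2 then d.insert p.1 (d.getD p.1 0 + 1) else d) d
      = ((smapItems.foldl (fun d p =>
            (PySem.List.dedup p.2).foldl (fun d fault => d.insert fault (d.getD fault [] ++ [p.1])) d)
            PySem.Dict.empty).getD s []).foldl (fun d c => d.insert c (d.getD c 0 + 1)) d := by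
  rw [getD_index_fold, PySem.Dict.getD_empty]
  simp only [List.nil_append]
  rw [List.foldl_map, List.foldl_filter]
  simp

-- Invariant tying the insertion-sort accumulator's head to the first-max scan state.
def ScanInv (acc : List (String × Int)) (b : Option String × Option Int) : Prop :=
  (acc = [] ∧ b = (none, none)) ∨ ∃ m t, acc = m :: t ∧ b = (some m.1, some m.2)

theorem insertBy_desc_cons (x m : String × Int) (t : List (String × Int)) :
    PySem.List.insertBy (fun a b => decide (b.2 < a.2)) x (m :: t)
      = if m.2 < x.2 then x :: m :: t else m :: PySem.List.insertBy (fun a b => decide (b.2 < a.2)) x t := by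
  simp [PySem.List.insertBy]

theorem scanInv_step (acc : List (String × Int)) (b : Option String × Option Int)
    (x : String × Int) (h : ScanInv acc b) :
    ScanInv (PySem.List.insertBy (fun a b => decide (b.2 < a.2)) x acc)
      (if (match b.2 with | none => true | some s => decide (s < x.2)) then (some x.1, some x.2) else b) := by
  rcases h with ⟨ha, hb⟩ | ⟨m, t, ha, hb⟩
  · subst ha; subst hb
    right
    exact ⟨x, [], by simp [PySem.List.insertBy], rfl⟩
  · subst ha; subst hb
    rw [insertBy_desc_cons]
    by_cases hlt : m.2 < x.2
    · rw [if_pos hlt, if_pos (by simpa using hlt)]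
      exact Or.inr ⟨x, _, rfl, rfl⟩
    · rw [if_neg hlt, if_neg (by simpa using hlt)]
      exact Or.inr ⟨m, _, rfl, rfl⟩

theorem scanInv_fold (l : List (String × Int)) (acc : List (String × Int))
    (b : Option String × Option Int) (h : ScanInv acc b) :
    ScanInv
      (l.foldl (fun acc x => PySem.List.insertBy (fun a b => decide (b.2 < a.2)) x acc) acc)
      (l.foldl (fun b p =>
        if (match b.2 with | none => true | some s => decide (s < p.2)) then (some p.1, some p.2) else b) b) := by
  induction l generalizing acc b with
  | nil => exact h
  | cons x l ih => exact ih _ _ (scanInv_step acc b x h)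

-- Head of the stable descending sort = result of the first-max scan.
theorem sorted_head_eq_scan (l : List (String × Int)) :
    (match PySem.List.sorted l (fun x => x.2) true with
     | [] => (none : Option String)
     | x :: _ => some x.1)
      = (l.foldl (fun b p =>
          if (match b.2 with | none => true | some s => decide (s < p.2)) then (some p.1, some p.2) else b)
          ((none : Option String), (none : Option Int))).1 := by
  rw [PySem.List.sorted_rev_eq_foldl_insertBy]
  have h := scanInv_fold l [] (none, none) (Or.inl ⟨rfl, rfl⟩)
  rcases h with ⟨ha, hb⟩ | ⟨m, t, ha, hb⟩
  · rw [ha, hb]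
  · rw [ha, hb]

-- The whole counting phase of A equals B's counting phase, from any starting dict.
theorem counts_fold_eq (system_map : List (String × List String)) (symptoms : List String)
    (d : PySem.Dict String Int) :
    symptoms.foldl (fun d symptom =>
        (PySem.Dict.ofList system_map).items.foldl
          (fun d p => if symptom ∈ p.2 then d.insert p.1 (d.getD p.1 0 + 1) else d) d) d
      = symptoms.foldl (fun d symptom =>
          (((PySem.Dict.ofList system_map).items.foldl (fun d p =>
              (PySem.List.dedup p.2).foldl (fun d fault => d.insert fault (d.getD fault [] ++ [p.1])) d)
              PySem.Dict.empty).getD symptom []).foldl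
            (fun d c => d.insert c (d.getD c 0 + 1)) d) d := by
  induction symptoms generalizing d with
  | nil => rfl
  | cons s rest ih =>
    simp only [List.foldl_cons]
    rw [counts_step_eq]
    exact ih _

-- ===== VERDICT (by name: the statement is the Claim_ definition above) =====
theorem identify_root_cause_spec : Claim_equal_identify_root_cause := by
  intro symptoms system_map _
  unfold Spec_identify_root_cause identify_root_cause identify_root_cause_alt
  simp only []
  rw [sorted_head_eq_scan, counts_fold_eq]
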